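-- pv_equiv track=rewrite | github.com/aetimmes/adventofcode | src/y2016/d07/b.py | supports_ssl
-- ===== SOURCE A (Python) =====
-- def supports_ssl(line):
--     """Check an IP to see if it supports SSL."""
--     outies = []
--     innies = []
--     while "[" in line:
--         ls, line = line.split("[", 1)
--         outies.append(ls)
--         mid, line = line.split("]", 1)
--         innies.append(mid)
--     if line:
--         outies.append(line)
--     abas = []
--     for o in outies:
--         abas.extend(get_abas(o))
--     babs = [aba[1] + aba[0] + aba[1] for aba in abas]
--     return any((bab in innie for bab in babs for innie in innies))
--
-- def get_abas(s):
--     """Return all ABAs in a string."""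
--     result = []
--     for i in range(len(s) - 2):
--         if s[i] == s[i + 2] and s[i] != s[i + 1]:
--             result.append(s[i:i + 3])
--     return result
-- ===== SOURCE B (Python) =====
-- def supports_ssl(line):
--     """Check an IP to see if it supports SSL (single-pass bracket scan + hypernet-ABA set)."""
--     outies, innies = [], []
--     cur = []
--     inside = False
--     for ch in line:
--         if not inside and ch == '[':
--             outies.append(''.join(cur))
--             cur = []
--             inside = True
--         elif inside and ch == ']':
--             innies.append(''.join(cur))
--             cur = []
--             inside = False
--         else:
--             cur.append(ch)
--     (innies if inside else outies).append(''.join(cur))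
--     bad = {s[i:i + 3]
--            for s in innies
--            for i in range(len(s) - 2)
--            if s[i] == s[i + 2] != s[i + 1]}
--     return any(s[i + 1] + s[i] + s[i + 1] in bad
--                for s in outies
--                for i in range(len(s) - 2)
--                if s[i] == s[i + 2] != s[i + 1])
-- ===== Notes on version B (the rewrite author's own statement) =====
-- stated objective: alternative
-- what changed: Replaces A's repeated split('[')/split(']') while-loop and per-bab substring scans over every hypernet segment with a single linear bracket-state scan plus a set of hypernet ABA triples queried once per supernet ABA.
-- outside the precondition, e.g. on supports_ssl('['): A raises ValueError, B returns False
import Mathlib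
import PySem

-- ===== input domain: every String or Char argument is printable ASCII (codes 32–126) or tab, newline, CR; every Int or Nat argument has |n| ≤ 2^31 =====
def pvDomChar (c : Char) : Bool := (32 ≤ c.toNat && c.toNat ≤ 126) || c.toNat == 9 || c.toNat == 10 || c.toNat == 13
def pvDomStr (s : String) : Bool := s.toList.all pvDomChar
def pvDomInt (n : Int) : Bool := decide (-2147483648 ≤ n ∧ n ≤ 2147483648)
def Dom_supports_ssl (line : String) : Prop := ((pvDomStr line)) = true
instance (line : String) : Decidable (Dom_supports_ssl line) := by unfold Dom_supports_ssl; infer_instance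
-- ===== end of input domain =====

-- B replaces A's repeated split('[')/split(']') loop with a single bracket-state scan and a
-- set of hypernet ABA triples looked up once per supernet ABA (a different algorithm of the
-- same overall cost on typical lines).

-- ===== PORT A =====

-- characterization of s.split(c, 1) for a one-character separator; the port's recursion
-- (termination) needs it, so it stays above the port
theorem pvGo_m0 (c : Char) (fuel : Nat) (l cur : List Char) (acc : List (List Char)) :
    PySem.Chars.splitOnMax.go [c] fuel 0 l cur acc = ((cur.reverse ++ l) :: acc).reverse := by
  cases fuel with
  | zero => simp [PySem.Chars.splitOnMax.go]
  | succ f => cases l with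
    | nil => simp [PySem.Chars.splitOnMax.go]
    | cons a t => simp [PySem.Chars.splitOnMax.go]

theorem pvGo_char (c : Char) : ∀ (l : List Char) (fuel : Nat) (cur : List Char)
    (acc : List (List Char)), l.length < fuel →
    PySem.Chars.splitOnMax.go [c] fuel 1 l cur acc =
      (if c ∈ l then
        ((l.dropWhile (fun x => x != c)).drop 1 ::
          (cur.reverse ++ l.takeWhile (fun x => x != c)) :: acc).reverse
      else ((cur.reverse ++ l) :: acc).reverse) := by
  intro l
  induction l with
  | nil =>
    intro fuel cur acc h
    cases fuel with
    | zero => omega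
    | succ f => simp [PySem.Chars.splitOnMax.go]
  | cons a t ih =>
    intro fuel cur acc h
    cases fuel with
    | zero => simp at h
    | succ f =>
      by_cases hac : a = c
      · subst hac
        simp only [PySem.Chars.splitOnMax.go, List.isPrefixOf, BEq.rfl, Bool.true_and,
          List.isPrefixOf_nil_left, if_true, if_neg (by omega : ¬ (1 : Nat) = 0)]
        rw [pvGo_m0]
        simp [List.dropWhile, List.takeWhile]
      · have hne : ([c].isPrefixOf (a :: t)) = false := by
          simp [List.isPrefixOf]
          intro h'
          exact absurd (Eq.symm h') hac
        have hbn : (a != c) = true := bne_iff_ne.mpr hac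
        simp only [PySem.Chars.splitOnMax.go, hne, if_neg (by omega : ¬ (1 : Nat) = 0)]
        rw [ih f (a :: cur) acc (by simpa using Nat.lt_of_succ_lt_succ h)]
        by_cases hct : c ∈ t
        · simp [hct, List.dropWhile, List.takeWhile, hbn, List.drop_one, Ne.symm hac]
        · simp [hct, List.dropWhile, List.takeWhile, hbn, List.drop_one, Ne.symm hac]

theorem pvSplitMax1 (s : List Char) (c : Char) :
    PySem.Chars.splitMax? s [c] 1 =
      some (if c ∈ s then
              [s.takeWhile (fun x => x != c), (s.dropWhile (fun x => x != c)).drop 1]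
            else [s]) := by
  have h1 : PySem.Chars.splitMax? s [c] 1 =
      some (PySem.Chars.splitOnMax.go [c] (s.length + 1) 1 s [] []) := by
    simp [PySem.Chars.splitMax?, PySem.Chars.splitOnMax]
  rw [h1, pvGo_char c s (s.length + 1) [] [] (by omega)]
  by_cases hc : c ∈ s <;> simp [hc]

-- `"[" in line` for the one-character needle is membership
theorem pvIsIn_single (c : Char) (s : List Char) :
    PySem.Chars.isIn [c] s = true ↔ c ∈ s := by
  rw [PySem.Chars.isIn_iff_infix]
  constructor
  · intro h; exact (List.IsInfix.sublist h).subset (by simp)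
  · intro h
    obtain ⟨p, q, rfl⟩ := List.append_of_mem h
    exact ⟨p, q, by simp⟩

-- the first-occurrence split: l = (chars before the first c) ++ c :: (chars after it)
theorem pvDW (c : Char) (l : List Char) (h : c ∈ l) :
    l = l.takeWhile (fun x => x != c) ++ c :: (l.dropWhile (fun x => x != c)).drop 1 ∧
    c ∉ l.takeWhile (fun x => x != c) := by
  induction l with
  | nil => simp at h
  | cons a t ih =>
    by_cases hac : a = c
    · subst hac
      constructor <;> simp [List.takeWhile, List.dropWhile, List.drop_one]
    · have hbn : (a != c) = true := bne_iff_ne.mpr hac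
      have hct : c ∈ t := by
        rcases List.mem_cons.mp h with h' | h'
        · exact absurd (Eq.symm h') hac
        · exact h'
      obtain ⟨h1, h2⟩ := ih hct
      constructor
      · conv_lhs => rw [h1]
        simp [List.takeWhile, List.dropWhile, hbn]
      · simp only [List.takeWhile, hbn]
        intro hmem
        rcases List.mem_cons.mp hmem with h' | h'
        · exact absurd (Eq.symm h') hac
        · exact h2 h'

-- the while-loop of A: repeatedly split off the next outie/innie pair; `none` = Python's
-- ValueError when a "[" has no matching "]" (tuple unpacking of a 1-element split fails)
def aLoop (line : List Char) (outies innies : List (List Char)) :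
    Option (List (List Char) × List (List Char) × List Char) :=
  if h : PySem.Chars.isIn ['['] line = true then
    match hs : PySem.Chars.splitMax? line ['['] 1 with
    | some [ls, rest] =>
      match hr : PySem.Chars.splitMax? rest [']'] 1 with
      | some [mid, rest2] => aLoop rest2 (outies ++ [ls]) (innies ++ [mid])
      | _ => none      -- ValueError: "]" absent, `mid, line = ...` unpacking fails
    | _ => none        -- unreachable: "[" ∈ line forces a two-element split
  else some (outies, innies, line)
termination_by line.length
decreasing_by
  have hin : '[' ∈ line := (pvIsIn_single '[' line).mp h
  rw [pvSplitMax1, if_pos hin] at hs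
  have hrest : rest = (line.dropWhile (fun x => x != '[')).drop 1 := by
    injection hs with hs'; injection hs' with _ hs2; injection hs2 with h2 _; exact h2.symm
  have h1 : rest.length < line.length := by
    have hsplit := (pvDW '[' line hin).1
    have : line.length =
        (line.takeWhile (fun x => x != '[')).length + 1 +
          ((line.dropWhile (fun x => x != '[')).drop 1).length := by
      conv_lhs => rw [hsplit]
      simp
      omega
    rw [hrest]
    omega
  have h2 : rest2.length ≤ rest.length := by
    by_cases hcr : ']' ∈ rest
    · rw [pvSplitMax1, if_pos hcr] at hr
      have hr2 : rest2 = (rest.dropWhile (fun x => x != ']')).drop 1 := by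
        injection hr with hr'; injection hr' with _ hrr; injection hrr with hh _; exact hh.symm
      have := List.length_dropWhile_le (fun x => x != ']') rest
      rw [hr2]
      simp only [List.length_drop]
      omega
    · rw [pvSplitMax1, if_neg hcr] at hr
      injection hr with hr'; simp at hr'
  omega

-- all ABAs in a string: `for i in range(len(s)-2): if s[i]==s[i+2] and s[i]!=s[i+1]: append s[i:i+3]`
def getAbas (s : List Char) : List (List Char) :=
  (PySem.List.pyRange 0 ((s.length : Int) - 2) 1).foldl
    (fun acc i =>
      if PySem.List.pyGet? s i == PySem.List.pyGet? s (i + 2) &&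
         PySem.List.pyGet? s i != PySem.List.pyGet? s (i + 1)
      then acc ++ [PySem.List.slice s (some i) (some (i + 3))] else acc) []

def supports_ssl (line : String) : Bool :=
  match aLoop line.toList [] [] with
  | none => false     -- Python raises ValueError here; Pre_supports_ssl excludes these inputs
  | some (outies, innies, rem) =>
    let outies := if rem.isEmpty then outies else outies ++ [rem]   -- `if line: outies.append(line)`
    let abas := outies.foldl (fun acc o => acc ++ getAbas o) []
    -- aba[1] + aba[0] + aba[1]; every element of abas has length 3, so the default is never read
    let babs := abas.map (fun aba =>
      [PySem.List.pyGetD aba 1 ' ', PySem.List.pyGetD aba 0 ' ', PySem.List.pyGetD aba 1 ' '])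
    babs.any (fun bab => innies.any (fun innie => PySem.Chars.isIn bab innie))

-- ===== PORT B =====

-- one step of B's single-pass scan: state = (inside brackets?, current segment, outies, innies)
def bStep (st : Bool × List Char × List (List Char) × List (List Char)) (ch : Char) :
    Bool × List Char × List (List Char) × List (List Char) :=
  match st with
  | (inside, cur, outies, innies) =>
    if !inside && ch == '[' then (true, [], outies ++ [cur], innies)
    else if inside && ch == ']' then (false, [], outies, innies ++ [cur])
    else (inside, cur ++ [ch], outies, innies)

-- the ABA-triple comprehension shared by B's set builder and its final generator
def bTriples (s : List Char) : List (List Char) :=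
  ((PySem.List.pyRange 0 ((s.length : Int) - 2) 1).filter (fun i =>
      PySem.List.pyGet? s i == PySem.List.pyGet? s (i + 2) &&
      PySem.List.pyGet? s (i + 2) != PySem.List.pyGet? s (i + 1))).map
    (fun i => PySem.List.slice s (some i) (some (i + 3)))

def supports_ssl_alt (line : String) : Bool :=
  match line.toList.foldl bStep (false, [], [], []) with
  | (inside, cur, outies, innies) =>
    let outies := if inside then outies else outies ++ [cur]
    let innies := if inside then innies ++ [cur] else innies
    let bad : PySem.Set (List Char) := PySem.Set.ofList (innies.flatMap bTriples)
    outies.any (fun s =>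
      (PySem.List.pyRange 0 ((s.length : Int) - 2) 1).any (fun i =>
        (PySem.List.pyGet? s i == PySem.List.pyGet? s (i + 2) &&
         PySem.List.pyGet? s (i + 2) != PySem.List.pyGet? s (i + 1)) &&
        -- s[i+1] + s[i] + s[i+1]; i is in range, so the default is never read
        PySem.Set.contains bad
          [PySem.List.pyGetD s (i + 1) ' ', PySem.List.pyGetD s i ' ',
           PySem.List.pyGetD s (i + 1) ' ']))

-- ===== PRECONDITION & SPEC =====

-- Pre_ excludes exactly the lines with an unmatched "[" (a suffix containing "[" but no "]"),
-- on which A's `mid, line = line.split("]", 1)` raises ValueError.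
def Pre_supports_ssl (line : String) : Prop :=
  ∀ t ∈ line.toList.tails, '[' ∈ t → ']' ∈ t
instance (line : String) : Decidable (Pre_supports_ssl line) := by
  unfold Pre_supports_ssl; infer_instance

def pvWitness_supports_ssl : String := "aba[bab]xyx"

def Spec_supports_ssl (line : String) (out : Bool) : Prop := out = supports_ssl_alt line
instance (line : String) (out : Bool) : Decidable (Spec_supports_ssl line out) := by
  unfold Spec_supports_ssl; infer_instance

-- ===== CLAIM (what is proved, stated in full; the proofs are below) =====
def Claim_equal_supports_ssl : Prop := ∀ (line : String), Dom_supports_ssl line →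
  Pre_supports_ssl line → Spec_supports_ssl line (supports_ssl line)

-- ===== LEMMAS AND PROOFS =====

-- s has the pattern x y x starting at index j
def pvHasABA (s : List Char) (x y : Char) : Prop :=
  ∃ j : Nat, s[j]? = some x ∧ s[j + 1]? = some y ∧ s[j + 2]? = some x

-- the common existential both final any-chains reduce to
def pvP (outies innies : List (List Char)) : Prop :=
  ∃ o ∈ outies, ∃ x y, x ≠ y ∧ pvHasABA o x y ∧ ∃ n ∈ innies, pvHasABA n y x

theorem pvPrefix3 (x y z : Char) (t : List Char) :
    [x, y, z] <+: t ↔ t[0]? = some x ∧ t[1]? = some y ∧ t[2]? = some z := by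
  constructor
  · rintro ⟨r, rfl⟩; simp
  · rintro ⟨h0, h1, h2⟩
    match t with
    | [] => simp at h0
    | [a] => simp at h1
    | [a, b] => simp at h2
    | a :: b :: c :: r =>
      simp only [List.getElem?_cons_zero, Option.some.injEq] at h0
      simp only [List.getElem?_cons_succ, List.getElem?_cons_zero, Option.some.injEq] at h1 h2
      subst h0; subst h1; subst h2
      exact ⟨r, rfl⟩

theorem pvIsIn_aba (x y : Char) (s : List Char) :
    PySem.Chars.isIn [x, y, x] s = true ↔ pvHasABA s x y := by
  rw [← PySem.Chars.exists_prefix_drop_iff_isIn]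
  constructor
  · rintro ⟨j, hp⟩
    rw [pvPrefix3] at hp
    exact ⟨j, by simpa [List.getElem?_drop] using hp⟩
  · rintro ⟨j, h0, h1, h2⟩
    exact ⟨j, (pvPrefix3 x y x _).mpr (by simpa [List.getElem?_drop] using ⟨h0, h1, h2⟩)⟩

theorem pvTake3_drop (s : List Char) (j : Nat) (x y z : Char)
    (h0 : s[j]? = some x) (h1 : s[j + 1]? = some y) (h2 : s[j + 2]? = some z) :
    (s.drop j).take 3 = [x, y, z] := by
  have hlen : j + 2 < s.length := by
    by_contra h; rw [List.getElem?_eq_none (by omega)] at h2; simp at h2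
  apply List.ext_getElem?
  intro k
  rw [List.getElem?_take]
  match k with
  | 0 => simpa [List.getElem?_drop] using h0
  | 1 => simpa [List.getElem?_drop] using h1
  | 2 => simpa [List.getElem?_drop] using h2
  | (n + 3) => simp

-- membership in A's get_abas, as an index-free existential
theorem pvMem_getAbas (s : List Char) (t : List Char) :
    t ∈ getAbas s ↔ ∃ x y, x ≠ y ∧ t = [x, y, x] ∧ pvHasABA s x y := by
  unfold getAbas
  rw [PySem.List.foldl_append_if]
  simp only [List.nil_append, List.mem_map, List.mem_filter]
  constructor
  · rintro ⟨i, ⟨hir, hcond⟩, rfl⟩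
    rw [PySem.List.mem_pyRange_one] at hir
    obtain ⟨hi0, hi2⟩ := hir
    set j := i.toNat with hj
    have hij : i = (j : Int) := by omega
    have hjlen : j + 2 < s.length := by omega
    have g0 : s[j]? = some s[j] := List.getElem?_eq_getElem (by omega)
    have g1 : s[j + 1]? = some s[j + 1] := List.getElem?_eq_getElem (by omega)
    have g2 : s[j + 2]? = some s[j + 2] := List.getElem?_eq_getElem (by omega)
    rw [hij] at hcond ⊢
    have e1 : (j : Int) + 2 = ((j + 2 : Nat) : Int) := by push_cast; ring
    have e2 : (j : Int) + 1 = ((j + 1 : Nat) : Int) := by push_cast; ring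
    rw [e1, e2, PySem.List.pyGet?_natCast, PySem.List.pyGet?_natCast,
      PySem.List.pyGet?_natCast, g0, g1, g2] at hcond
    simp only [Bool.and_eq_true, beq_iff_eq, bne_iff_ne, Option.some.injEq, ne_eq] at hcond
    refine ⟨s[j], s[j + 1], hcond.2, ?_, j, g0, g1, by rw [← hcond.1] at g2; exact g2⟩
    have e3 : (j : Int) + 3 = (j : Int) + ((3 : Nat) : Int) := by push_cast; ring
    rw [e3, PySem.List.slice_natCast_add]
    rw [pvTake3_drop s j _ _ _ g0 g1 g2, hcond.1]
  · rintro ⟨x, y, hxy, rfl, j, h0, h1, h2⟩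
    have hjlen : j + 2 < s.length := by
      by_contra h; rw [List.getElem?_eq_none (by omega)] at h2; simp at h2
    refine ⟨(j : Int), ⟨?_, ?_⟩, ?_⟩
    · rw [PySem.List.mem_pyRange_one]; omega
    · have e1 : (j : Int) + 2 = ((j + 2 : Nat) : Int) := by push_cast; ring
      have e2 : (j : Int) + 1 = ((j + 1 : Nat) : Int) := by push_cast; ring
      rw [e1, e2, PySem.List.pyGet?_natCast, PySem.List.pyGet?_natCast,
        PySem.List.pyGet?_natCast, h0, h1, h2]
      simp [hxy]
    · have e3 : (j : Int) + 3 = (j : Int) + ((3 : Nat) : Int) := by push_cast; ring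
      rw [e3, PySem.List.slice_natCast_add, pvTake3_drop s j x y x h0 h1 h2]

-- B's comprehension filter is pointwise equal to A's (both demand s[i]==s[i+2] and a middle
-- that differs), so bTriples = getAbas
theorem pvBTriples_eq (s : List Char) : bTriples s = getAbas s := by
  unfold bTriples getAbas
  rw [PySem.List.foldl_append_if, List.nil_append]
  congr 1
  apply List.filter_congr
  intro i _
  cases h : (PySem.List.pyGet? s i == PySem.List.pyGet? s (i + 2)) with
  | false => simp [h]
  | true =>
    have heq : PySem.List.pyGet? s i = PySem.List.pyGet? s (i + 2) := beq_iff_eq.mp h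
    simp [h, heq]

-- scanning a bracket-free stretch outside brackets only grows the current segment
theorem pvScan_outside (l : List Char) (h : '[' ∉ l) (cur : List Char)
    (o i : List (List Char)) :
    l.foldl bStep (false, cur, o, i) = (false, cur ++ l, o, i) := by
  induction l generalizing cur with
  | nil => simp
  | cons a t ih =>
    have ha : a ≠ '[' := fun hh => h (hh ▸ List.mem_cons_self)
    have ht : '[' ∉ t := fun hh => h (List.mem_cons_of_mem _ hh)
    simp only [List.foldl_cons]
    have hstep : bStep (false, cur, o, i) a = (false, cur ++ [a], o, i) := by
      simp [bStep, ha]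
    rw [hstep, ih ht (cur ++ [a])]
    simp

theorem pvScan_inside (l : List Char) (h : ']' ∉ l) (cur : List Char)
    (o i : List (List Char)) :
    l.foldl bStep (true, cur, o, i) = (true, cur ++ l, o, i) := by
  induction l generalizing cur with
  | nil => simp
  | cons a t ih =>
    have ha : a ≠ ']' := fun hh => h (hh ▸ List.mem_cons_self)
    have ht : ']' ∉ t := fun hh => h (List.mem_cons_of_mem _ hh)
    simp only [List.foldl_cons]
    have hstep : bStep (true, cur, o, i) a = (true, cur ++ [a], o, i) := by
      simp [bStep, ha]
    rw [hstep, ih ht (cur ++ [a])]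
    simp

-- closed lines: each suffix holding a "[" also holds a "]"
def pvClosed (l : List Char) : Prop := ∀ t, t <:+ l → '[' ∈ t → ']' ∈ t

-- the heart: A's split loop and B's single-pass scan produce the same segmentation
theorem pvMain : ∀ (n : Nat) (l : List Char), l.length ≤ n → pvClosed l →
    ∀ (o i : List (List Char)), ∃ o' i' rem,
      aLoop l o i = some (o', i', rem) ∧
      l.foldl bStep (false, [], o, i) = (false, rem, o', i') := by
  intro n
  induction n with
  | zero =>
    intro l hl _ o i
    cases l with
    | cons a t => simp at hl
    | nil =>
      refine ⟨o, i, [], ?_, by simp⟩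
      rw [aLoop, dif_neg (fun hc => by simpa using (pvIsIn_single '[' []).mp hc)]
  | succ n ih =>
    intro l hl hcl o i
    by_cases hin : '[' ∈ l
    · -- l = a ++ '[' :: (b ++ ']' :: rest2)
      have hsplit1 := pvSplitMax1 l '['
      rw [if_pos hin] at hsplit1
      obtain ⟨hla, hana⟩ := pvDW '[' l hin
      generalize hga : l.takeWhile (fun x => x != '[') = a at hsplit1 hla hana
      generalize hgr : (l.dropWhile (fun x => x != '[')).drop 1 = rest at hsplit1 hla
      -- Pre gives a "]" inside rest
      have hcr : ']' ∈ rest := by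
        have hsuf : '[' :: rest <:+ l := ⟨a, by rw [← hla]⟩
        have := hcl _ hsuf (by simp)
        simpa using this
      have hsplit2 := pvSplitMax1 rest ']'
      rw [if_pos hcr] at hsplit2
      obtain ⟨hrb, hbnb⟩ := pvDW ']' rest hcr
      generalize hgb : rest.takeWhile (fun x => x != ']') = b at hsplit2 hrb hbnb
      generalize hgr2 : (rest.dropWhile (fun x => x != ']')).drop 1 = rest2 at hsplit2 hrb
      -- length bookkeeping for the induction
      have hlen : rest2.length ≤ n := by
        have h1 : l.length = a.length + 1 + rest.length := by
          conv_lhs => rw [hla]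
          simp
          omega
        have h2 : rest.length = b.length + 1 + rest2.length := by
          conv_lhs => rw [hrb]
          simp
          omega
        omega
      -- pvClosed survives on the suffix rest2
      have hcl2 : pvClosed rest2 := by
        intro t hsuf hmem
        refine hcl t (hsuf.trans ?_) hmem
        rw [hla, hrb]
        refine ⟨a ++ '[' :: b ++ [']'], ?_⟩
        simp only [List.append_assoc, List.cons_append, List.singleton_append, List.nil_append]
      obtain ⟨o', i', rem, hA, hB⟩ := ih rest2 hlen hcl2 (o ++ [a]) (i ++ [b])
      refine ⟨o', i', rem, ?_, ?_⟩
      · -- A side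
        rw [aLoop, dif_pos ((pvIsIn_single '[' l).mpr hin)]
        split
        · rename_i ls rest' heq
          rw [hsplit1] at heq
          injection heq with heq1
          injection heq1 with e1 heq2
          injection heq2 with e2 _
          subst e1; subst e2
          split
          · rename_i mid rest2' heq'
            rw [hsplit2] at heq'
            injection heq' with heq1'
            injection heq1' with f1 heq2'
            injection heq2' with f2 _
            subst f1; subst f2
            exact hA
          all_goals rename_i heq'
          all_goals rw [hsplit2] at heq'
          all_goals simp at heq'
        all_goals rename_i heq
        all_goals rw [hsplit1] at heq
        all_goals simp at heq
      · -- B side: walk a, then '[', then b, then ']', then recurse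
        conv_lhs => rw [hla, hrb]
        rw [List.foldl_append, pvScan_outside a hana [] o i]
        simp only [List.foldl_cons, List.nil_append]
        have hstep1 : bStep (false, a, o, i) '[' = (true, [], o ++ [a], i) := by
          simp [bStep]
        rw [hstep1, List.foldl_append, pvScan_inside b hbnb [] (o ++ [a]) i]
        simp only [List.foldl_cons, List.nil_append]
        have hstep2 : bStep (true, b, o ++ [a], i) ']' = (false, [], o ++ [a], i ++ [b]) := by
          simp [bStep]
        rw [hstep2]
        exact hB
    · refine ⟨o, i, l, ?_, ?_⟩
      · rw [aLoop, dif_neg (fun hc => hin ((pvIsIn_single '[' l).mp hc))]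
      · rw [pvScan_outside l hin [] o i]
        simp

-- a 3-element literal read with pyGetD
theorem pvGetD3 (x y z d : Char) :
    PySem.List.pyGetD [x, y, z] 0 d = x ∧ PySem.List.pyGetD [x, y, z] 1 d = y := by
  constructor <;> rfl

-- A's final any-chain, characterized
theorem pvA_char (outies innies : List (List Char)) :
    ((outies.foldl (fun acc o => acc ++ getAbas o) []).map (fun aba =>
        [PySem.List.pyGetD aba 1 ' ', PySem.List.pyGetD aba 0 ' ',
         PySem.List.pyGetD aba 1 ' '])).any
      (fun bab => innies.any (fun innie => PySem.Chars.isIn bab innie)) = true ↔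
    pvP outies innies := by
  rw [PySem.List.foldl_append_eq_flatMap, List.nil_append]
  simp only [List.any_eq_true, List.mem_map, List.mem_flatMap]
  constructor
  · rintro ⟨bab, ⟨aba, ⟨o, ho, haba⟩, rfl⟩, n, hn, hIs⟩
    obtain ⟨x, y, hxy, rfl, hABA⟩ := (pvMem_getAbas o aba).mp haba
    refine ⟨o, ho, x, y, hxy, hABA, n, hn, ?_⟩
    rw [(pvGetD3 x y x ' ').1, (pvGetD3 x y x ' ').2] at hIs
    exact (pvIsIn_aba y x n).mp hIs
  · rintro ⟨o, ho, x, y, hxy, hABA, n, hn, hIn⟩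
    refine ⟨[y, x, y], ⟨[x, y, x], ⟨o, ho, (pvMem_getAbas o _).mpr ⟨x, y, hxy, rfl, hABA⟩⟩, ?_⟩,
      n, hn, (pvIsIn_aba y x n).mpr hIn⟩
    rw [(pvGetD3 x y x ' ').1, (pvGetD3 x y x ' ').2]

-- B's final any-chain, characterized
theorem pvB_char (outies innies : List (List Char)) :
    (outies.any (fun s =>
      (PySem.List.pyRange 0 ((s.length : Int) - 2) 1).any (fun i =>
        (PySem.List.pyGet? s i == PySem.List.pyGet? s (i + 2) &&
         PySem.List.pyGet? s (i + 2) != PySem.List.pyGet? s (i + 1)) &&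
        PySem.Set.contains (PySem.Set.ofList (innies.flatMap bTriples))
          [PySem.List.pyGetD s (i + 1) ' ', PySem.List.pyGetD s i ' ',
           PySem.List.pyGetD s (i + 1) ' ']))) = true ↔
    pvP outies innies := by
  have hbad : ∀ t, PySem.Set.contains (PySem.Set.ofList (innies.flatMap bTriples)) t = true ↔
      ∃ n ∈ innies, t ∈ getAbas n := by
    intro t
    unfold PySem.Set.contains
    rw [List.contains_iff_mem, PySem.Set.mem_ofList, List.mem_flatMap]
    constructor
    · rintro ⟨n, hn, ht⟩; exact ⟨n, hn, by rwa [← pvBTriples_eq]⟩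
    · rintro ⟨n, hn, ht⟩; exact ⟨n, hn, by rwa [pvBTriples_eq]⟩
  simp only [List.any_eq_true, Bool.and_eq_true]
  constructor
  · rintro ⟨s, hs, i, hir, hcond, hmem⟩
    obtain ⟨hi0, hi2⟩ := PySem.List.mem_pyRange_one.mp hir
    -- the (i, cond) pair is exactly "s[i:i+3] ∈ getAbas s"
    have htrip : PySem.List.slice s (some i) (some (i + 3)) ∈ getAbas s := by
      unfold getAbas
      rw [PySem.List.foldl_append_if, List.nil_append]
      refine List.mem_map.mpr ⟨i, List.mem_filter.mpr ⟨hir, ?_⟩, rfl⟩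
      -- A's condition follows from B's (equal ends make the two "≠ middle" tests agree)
      obtain ⟨hc1, hc2⟩ := hcond
      rw [beq_iff_eq] at hc1
      rw [Bool.and_eq_true, hc1, beq_iff_eq]
      exact ⟨rfl, hc2⟩
    obtain ⟨x, y, hxy, heq, hABA⟩ := (pvMem_getAbas s _).mp htrip
    -- read the concrete chars off the slice to identify the looked-up bab
    have hsl3 : PySem.List.slice s (some i) (some (i + 3)) = (s.drop i.toNat).take 3 := by
      rw [PySem.List.slice_toNat s hi0 (by omega)]
      congr 1
      omega
    rw [hsl3] at heq
    have h0 : s[i.toNat]? = some x := by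
      have := congrArg (fun l => l[0]?) heq
      simpa [List.getElem?_take, List.getElem?_drop] using this
    have h1 : s[i.toNat + 1]? = some y := by
      have := congrArg (fun l => l[1]?) heq
      simpa [List.getElem?_take, List.getElem?_drop] using this
    have hget0 : PySem.List.pyGetD s i ' ' = x := by
      rw [PySem.List.pyGetD_of_nonneg _ _ hi0, List.getD_eq_getElem?_getD, h0]
      rfl
    have hget1 : PySem.List.pyGetD s (i + 1) ' ' = y := by
      have e : (i + 1).toNat = i.toNat + 1 := by omega
      rw [PySem.List.pyGetD_of_nonneg _ _ (by omega), e, List.getD_eq_getElem?_getD, h1]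
      rfl
    rw [hget0, hget1] at hmem
    obtain ⟨n, hn, hinn⟩ := (hbad _).mp hmem
    obtain ⟨x', y', hxy', heq2, hABA2⟩ := (pvMem_getAbas n _).mp hinn
    injection heq2 with f0 heq2'
    injection heq2' with f1 _
    rw [← f0, ← f1] at hABA2
    exact ⟨s, hs, x, y, hxy, hABA, n, hn, hABA2⟩
  · rintro ⟨o, ho, x, y, hxy, hABA, n, hn, hIn⟩
    obtain ⟨j, h0, h1, h2⟩ := hABA
    have hjlen : j + 2 < o.length := by
      by_contra h; rw [List.getElem?_eq_none (by omega)] at h2; simp at h2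
    refine ⟨o, ho, (j : Int), PySem.List.mem_pyRange_one.mpr (by constructor <;> omega), ?_, ?_⟩
    · have e1 : (j : Int) + 2 = ((j + 2 : Nat) : Int) := by push_cast; ring
      have e2 : (j : Int) + 1 = ((j + 1 : Nat) : Int) := by push_cast; ring
      rw [e1, e2, PySem.List.pyGet?_natCast, PySem.List.pyGet?_natCast,
        PySem.List.pyGet?_natCast, h0, h1, h2]
      exact ⟨by simp, by simp [hxy]⟩
    · have hget0 : PySem.List.pyGetD o (j : Int) ' ' = x := by
        rw [PySem.List.pyGetD_of_nonneg _ _ (by positivity)]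
        simp only [Int.toNat_natCast]
        rw [List.getD_eq_getElem?_getD, h0]
        rfl
      have hget1 : PySem.List.pyGetD o ((j : Int) + 1) ' ' = y := by
        have e : (j : Int) + 1 = ((j + 1 : Nat) : Int) := by push_cast; ring
        rw [e, PySem.List.pyGetD_of_nonneg _ _ (by positivity)]
        simp only [Int.toNat_natCast]
        rw [List.getD_eq_getElem?_getD, h1]
        rfl
      rw [hget0, hget1]
      exact (hbad _).mpr ⟨n, hn, (pvMem_getAbas n _).mpr ⟨y, x, fun h => hxy h.symm, rfl, hIn⟩⟩

-- an empty segment carries no ABA, so the trailing "" B appends never matters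
theorem pvP_empty_tail (o' : List (List Char)) (innies : List (List Char)) :
    pvP o' innies ↔ pvP (o' ++ [[]]) innies := by
  unfold pvP
  constructor
  · rintro ⟨o, ho, rest⟩; exact ⟨o, List.mem_append_left _ ho, rest⟩
  · rintro ⟨o, ho, x, y, hxy, ⟨j, h0, _, _⟩, rest⟩
    rcases List.mem_append.mp ho with h | h
    · exact ⟨o, h, x, y, hxy, ⟨j, h0, by assumption, by assumption⟩, rest⟩
    · simp only [List.mem_singleton] at h
      subst h
      simp at h0

-- ===== VERDICT (by name: the statement is the Claim_ definition above) =====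
theorem supports_ssl_spec : Claim_equal_supports_ssl := by
  unfold Claim_equal_supports_ssl
  intro line _ hpre
  unfold Spec_supports_ssl
  have hcl : pvClosed line.toList := by
    intro t hsuf hmem
    exact hpre t ((List.mem_tails t line.toList).mpr hsuf) hmem
  obtain ⟨o', i', rem, hA, hB⟩ :=
    pvMain line.toList.length line.toList le_rfl hcl [] []
  unfold supports_ssl supports_ssl_alt
  rw [hA, hB]
  simp only
  rw [if_neg (by simp : ¬ false = true), if_neg (by simp : ¬ false = true)]
  rw [Bool.eq_iff_iff, pvA_char, pvB_char]
  by_cases hrem : rem = []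
  · subst hrem
    simp only [List.isEmpty_nil, if_true]
    exact pvP_empty_tail o' i'
  · rw [if_neg (by simpa [List.isEmpty_iff] using hrem)]
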